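-- pv_equiv track=rewrite | github.com/EITD/NOVIX | backend/app/agents/archivist.py | _filter_explicit_mentions
-- ===== SOURCE A (Python) =====
-- from typing import Any, Dict, List, Optional, Tuple
--
-- def _filter_explicit_mentions(
--
--     text: str,
--     names: List[str],
--     candidates: Dict[str, Dict[str, Any]],
-- ) -> List[str]:
--     cleaned_text = text or ""
--     result: List[str] = []
--     for name in names or []:
--         meta = candidates.get(name) or {}
--         tokens = [name]
--         tokens.extend(meta.get("aliases") or [])
--         if any(token and token in cleaned_text for token in tokens):
--             if name not in result:
--                 result.append(name)
--     return result
-- ===== SOURCE B (Python) =====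
-- from typing import Any, Dict, List
--
-- def _filter_explicit_mentions(
--     text: str,
--     names: List[str],
--     candidates: Dict[str, Dict[str, Any]],
-- ) -> List[str]:
--     cleaned_text = text or ""
--     ordered = list(dict.fromkeys(names or []))
--
--     # Stage 1: inverted index, token -> names owning that token (insertion order).
--     index: Dict[str, List[str]] = {}
--     for name in ordered:
--         meta = candidates.get(name) or {}
--         for token in [name, *(meta.get("aliases") or [])]:
--             if token:
--                 index[token] = index.get(token, []) + [name]
--
--     # Stage 2: one substring test per DISTINCT token; collect mentioned names.
--     mentioned = set()
--     for token, owners in index.items():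
--         if token in cleaned_text:
--             mentioned.update(owners)
--
--     # Stage 3: keep the order of first occurrence in names.
--     return [name for name in ordered if name in mentioned]
-- ===== Notes on version B (the rewrite author's own statement) =====
-- stated objective: alternative
-- what changed: A scans the growing result list for dedup and re-runs every substring test per occurrence of a name; B builds an inverted index token->owning names, performs one substring test per DISTINCT token to collect a mentioned-set, then emits the deduplicated names filtered by set membership (three staged passes; removes the result-list rescans and repeated matching on duplicate names).
import Mathlib
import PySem

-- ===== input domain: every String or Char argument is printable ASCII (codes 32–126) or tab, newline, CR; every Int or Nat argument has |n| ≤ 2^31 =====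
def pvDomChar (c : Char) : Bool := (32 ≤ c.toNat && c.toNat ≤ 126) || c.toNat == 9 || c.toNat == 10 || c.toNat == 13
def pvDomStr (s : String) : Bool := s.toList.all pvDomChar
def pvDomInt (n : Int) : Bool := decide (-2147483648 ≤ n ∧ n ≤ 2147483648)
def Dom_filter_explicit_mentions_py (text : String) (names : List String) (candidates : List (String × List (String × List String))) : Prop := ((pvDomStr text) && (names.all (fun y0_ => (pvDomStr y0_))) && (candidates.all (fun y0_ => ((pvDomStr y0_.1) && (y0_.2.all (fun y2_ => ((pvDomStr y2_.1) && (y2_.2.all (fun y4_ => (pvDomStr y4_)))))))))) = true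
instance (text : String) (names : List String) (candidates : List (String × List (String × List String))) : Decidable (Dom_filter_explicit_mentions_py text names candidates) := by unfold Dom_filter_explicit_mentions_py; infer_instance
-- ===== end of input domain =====

-- B builds an inverted index token -> owning names, tests each distinct token against
-- the text once to collect a mentioned-set, then filters the deduplicated names by
-- set membership — instead of A's per-name dedupe-on-append loop.


-- ===== PORT A =====
-- dict.get on an association list (first match); 'or {}' / 'or []' = getD default
def pvAssocGet {α : Type} (l : List (String × α)) (k : String) : Option α :=
  (l.find? (fun p => p.1 == k)).map (·.2)

-- tokens = [name] + (meta.get("aliases") or [])  (both Pythons compute this list)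
def pvTokens (candidates : List (String × List (String × List String))) (name : String) : List String :=
  let md := (pvAssocGet candidates name).getD []
  name :: (pvAssocGet md "aliases").getD []

-- A's per-name test: any(token and token in cleaned_text)
def pvTokensHitA (cleaned : String) (candidates : List (String × List (String × List String))) (name : String) : Bool :=
  (pvTokens candidates name).any (fun token => (token != "") && PySem.Str.isIn token cleaned)

-- 'cleaned_text = text or ""' is text itself ("" or "" = ""), kept as-is
def filter_explicit_mentions_py (text : String) (names : List String) (candidates : List (String × List (String × List String))) : List String :=
  names.foldl (fun result name =>
    if pvTokensHitA text candidates name then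
      if result.contains name then result else result ++ [name]
    else result) []

-- ===== PORT B =====
-- Source B: ordered = dict.fromkeys; inverted index token -> owning names
-- (index[token] = index.get(token, []) + [name] is Dict.modify); mentioned-set;
-- final filter of ordered by set membership
def filter_explicit_mentions_py_alt (text : String) (names : List String) (candidates : List (String × List (String × List String))) : List String :=
  let ordered := PySem.List.dedup names
  let index : PySem.Dict String (List String) :=
    ordered.foldl (fun d name =>
      (pvTokens candidates name).foldl (fun d token =>
        if token != "" then d.modify token [] (fun l => l ++ [name]) else d) d)
      PySem.Dict.empty
  let mentioned : PySem.Set String :=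
    index.items.foldl (fun s p =>
      if PySem.Str.isIn p.1 text then PySem.Set.update s p.2 else s) PySem.Set.empty
  ordered.filter (fun n => PySem.Set.contains mentioned n)

-- ===== PRECONDITION & SPEC =====
def Spec_filter_explicit_mentions_py (text : String) (names : List String) (candidates : List (String × List (String × List String))) (out : List String) : Prop := out = filter_explicit_mentions_py_alt text names candidates
instance (text : String) (names : List String) (candidates : List (String × List (String × List String))) (out : List String) : Decidable (Spec_filter_explicit_mentions_py text names candidates out) := by unfold Spec_filter_explicit_mentions_py; infer_instance

-- ===== CLAIM =====
def Claim_equal_filter_explicit_mentions_py : Prop := ∀ (text : String) (names : List String) (candidates : List (String × List (String × List String))), Dom_filter_explicit_mentions_py text names candidates → Spec_filter_explicit_mentions_py text names candidates (filter_explicit_mentions_py text names candidates)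

-- ===== LEMMAS AND PROOFS =====

-- the flat (token, owner) pair list B's index is built from (proof-side view)
def pvPairs (candidates : List (String × List (String × List String))) (ordered : List String) : List (String × String) :=
  ordered.flatMap (fun name => ((pvTokens candidates name).filter (fun t => t != "")).map (fun t => (t, name)))

-- Loop invariant for A: the fold over any suffix, started from the filtered dedup of
-- the processed prefix p, lands on the filtered dedup of the whole list.
theorem pv_loop_eq (f : String → Bool) :
    ∀ (names p : List String),
      names.foldl (fun result name =>
        if f name then
          if result.contains name then result else result ++ [name]
        else result) ((PySem.Set.ofList p).filter f)
      = (PySem.Set.ofList (p ++ names)).filter f := by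
  intro names
  induction names with
  | nil => intro p; simp
  | cons n rest ih =>
    intro p
    have hstep :
        (if f n then
          if ((PySem.Set.ofList p).filter f).contains n then (PySem.Set.ofList p).filter f
          else (PySem.Set.ofList p).filter f ++ [n]
        else (PySem.Set.ofList p).filter f)
        = (PySem.Set.ofList (p ++ [n])).filter f := by
      have hof : PySem.Set.ofList (p ++ [n]) = (PySem.Set.ofList p).add n := by
        simp [PySem.Set.ofList, List.foldl_append]
      rw [hof]
      by_cases hp : n ∈ p
      · by_cases hf : f n = true
        · simp [PySem.Set.add, PySem.Set.mem_ofList, List.mem_filter, hp, hf]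
        · simp only [Bool.not_eq_true] at hf
          simp [PySem.Set.add, PySem.Set.mem_ofList, hp, hf]
      · by_cases hf : f n = true
        · simp [PySem.Set.add, PySem.Set.mem_ofList, hp, hf, List.filter_append]
        · simp only [Bool.not_eq_true] at hf
          simp [PySem.Set.add, PySem.Set.mem_ofList, hp, hf, List.filter_append]
    calc (n :: rest).foldl (fun result name =>
            if f name then
              if result.contains name then result else result ++ [name]
            else result) ((PySem.Set.ofList p).filter f)
        = rest.foldl (fun result name =>
            if f name then
              if result.contains name then result else result ++ [name]
            else result) ((PySem.Set.ofList (p ++ [n])).filter f) := by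
          rw [List.foldl_cons, hstep]
      _ = (PySem.Set.ofList ((p ++ [n]) ++ rest)).filter f := ih (p ++ [n])
      _ = (PySem.Set.ofList (p ++ n :: rest)).filter f := by simp

theorem pv_index_eq (candidates : List (String × List (String × List String))) (ordered : List String) :
    ordered.foldl (fun d name =>
      (pvTokens candidates name).foldl (fun d token =>
        if token != "" then d.modify token [] (fun l => l ++ [name]) else d) d)
      PySem.Dict.empty
    = (pvPairs candidates ordered).foldl
        (fun d p => d.modify p.1 [] (fun l => l ++ [p.2])) PySem.Dict.empty := by
  simp only [pvPairs, List.foldl_flatMap, List.foldl_map, List.foldl_filter]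

theorem pv_mem_mentioned (text : String) (items : List (String × List String)) (s : PySem.Set String) (n : String) :
    (n ∈ items.foldl (fun s p =>
      if PySem.Str.isIn p.1 text then PySem.Set.update s p.2 else s) s)
    ↔ (n ∈ s ∨ ∃ p ∈ items, PySem.Str.isIn p.1 text = true ∧ n ∈ p.2) := by
  induction items generalizing s with
  | nil => simp
  | cons q rest ih =>
    simp only [List.foldl_cons]
    by_cases hq : PySem.Str.isIn q.1 text = true
    · rw [if_pos hq, ih]
      simp [PySem.Set.mem_update, or_assoc]
      tauto
    · rw [if_neg hq, ih]
      simp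
      tauto

theorem pv_mentioned_iff (text : String) (candidates : List (String × List (String × List String))) (ordered : List String) (n : String) (hn : n ∈ ordered) :
    (n ∈ ( (ordered.foldl (fun d name =>
      (pvTokens candidates name).foldl (fun d token =>
        if token != "" then d.modify token [] (fun l => l ++ [name]) else d) d)
      (PySem.Dict.empty : PySem.Dict String (List String))).items.foldl (fun s p =>
      if PySem.Str.isIn p.1 text then PySem.Set.update s p.2 else s) PySem.Set.empty))
    ↔ pvTokensHitA text candidates n = true := by
  rw [pv_mem_mentioned, pv_index_eq]
  set pairs := pvPairs candidates ordered with hpairs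
  have hnd : ((pairs.foldl (fun d p => d.modify p.1 [] (fun l => l ++ [p.2])) PySem.Dict.empty)).keys.Nodup :=
    PySem.Dict.nodup_keys_foldl_modify_key pairs Prod.fst [] (fun _ p l => l ++ [p.2]) PySem.Dict.empty PySem.Dict.nodup_keys_empty
  have hkeys : ((pairs.foldl (fun d p => d.modify p.1 [] (fun l => l ++ [p.2])) PySem.Dict.empty)).keys
      = PySem.Set.ofList (pairs.map Prod.fst) := by
    rw [PySem.Dict.keys_foldl_modify_key]
    simp [PySem.Dict.keys_empty, PySem.Set.update_nil_left]
  have hitems := PySem.Dict.items_eq_map_keys _ hnd ([] : List String)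
  rw [hitems, hkeys]
  have hgetD : ∀ k, ((pairs.foldl (fun d p => d.modify p.1 [] (fun l => l ++ [p.2])) PySem.Dict.empty)).getD k []
      = (pairs.filter (fun p => p.1 == k)).map (·.2) := by
    intro k
    rw [PySem.Dict.getD_foldl_modify_append]
    simp
  constructor
  · rintro (h | ⟨p, hp, hin, hnp⟩)
    · simp [PySem.Set.empty] at h
    · obtain ⟨k, hk, rfl⟩ := List.mem_map.mp hp
      rw [hgetD] at hnp
      obtain ⟨q, hq, rfl⟩ := List.mem_map.mp hnp
      have hqf := List.mem_filter.mp hq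
      have hq1 : q.1 = k := by simpa using hqf.2
      obtain ⟨name, hname, hqp⟩ := List.mem_flatMap.mp hqf.1
      obtain ⟨t, ht, rfl⟩ := List.mem_map.mp hqp
      have htf := List.mem_filter.mp ht
      simp only [pvTokensHitA, List.any_eq_true]
      exact ⟨t, htf.1, by simp_all⟩
  · intro h
    simp only [pvTokensHitA, List.any_eq_true, Bool.and_eq_true, bne_iff_ne, ne_eq] at h
    obtain ⟨t, ht, hne, hisin⟩ := h
    right
    have hqmem : (t, n) ∈ pairs := by
      rw [hpairs, pvPairs, List.mem_flatMap]
      exact ⟨n, hn, List.mem_map.mpr ⟨t, List.mem_filter.mpr ⟨ht, by simpa using hne⟩, rfl⟩⟩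
    refine ⟨(t, (pairs.filter (fun p => p.1 == t)).map (·.2)), ?_, ?_, ?_⟩
    · refine List.mem_map.mpr ⟨t, ?_, by rw [hgetD]⟩
      rw [PySem.Set.mem_ofList]
      exact List.mem_map.mpr ⟨(t, n), hqmem, rfl⟩
    · simpa using hisin
    · exact List.mem_map.mpr ⟨(t, n), List.mem_filter.mpr ⟨hqmem, by simp⟩, rfl⟩

-- ===== VERDICT =====
theorem filter_explicit_mentions_py_spec : Claim_equal_filter_explicit_mentions_py := by
  intro text names candidates _
  unfold Spec_filter_explicit_mentions_py filter_explicit_mentions_py filter_explicit_mentions_py_alt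
  have h := pv_loop_eq (pvTokensHitA text candidates) names []
  simp only [List.nil_append, PySem.Set.ofList_nil, List.filter_nil] at h
  rw [h, PySem.List.dedup_eq_ofList]
  apply List.filter_congr
  intro n hn
  rw [Bool.eq_iff_iff, PySem.Set.contains_iff,
      pv_mentioned_iff text candidates (PySem.Set.ofList names) n hn]
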